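-- pv_equiv track=rewrite | github.com/sshuaichai/pycss | pyradiomics-master/radiomics/data_Conversion_and_extraction/Supervised learning/preprocess/selection_bestk_LR.py | split_feature_names
-- ===== SOURCE A (Python) =====
-- def split_feature_names(feature_names):
--   """
--   将特征名称在最接近中点的下划线处分割成两行。
--   """
--   split_names = []
--   for name in feature_names:
--     mid_point = len(name) // 2
--     left_index = name.rfind('_', 0, mid_point)
--     right_index = name.find('_', mid_point)
--     if left_index == -1 and right_index == -1:
--       split_point = len(name)
--     elif left_index == -1:
--       split_point = right_index
--     elif right_index == -1:
--       split_point = left_index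
--     else:
--       split_point = left_index if (mid_point - left_index) < (right_index - mid_point) else right_index
--     split_name = name if split_point == len(name) else name[:split_point] + '\n' + name[split_point + 1:]
--     split_names.append(split_name)
--   return split_names
-- ===== SOURCE B (Python) =====
-- def _split_one(name):
--     idxs = [i for i, c in enumerate(name) if c == '_']
--     if not idxs:
--         return name
--     mid = len(name) // 2
--     sp = min(idxs, key=lambda p: (abs(p - mid), -p))
--     return name[:sp] + '\n' + name[sp + 1:]
--
--
-- def split_feature_names(feature_names):
--     return [_split_one(name) for name in feature_names]
-- ===== Notes on version B (the rewrite author's own statement) =====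
-- stated objective: simpler
-- what changed: Replaces the two directional searches (rfind left of the midpoint, find right of it) and the four-way branch chain by a single gather of all underscore positions followed by one argmin under the key (abs(p-mid), -p), which encodes the nearest-underscore choice and the right-on-tie rule directly.
import Mathlib
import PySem

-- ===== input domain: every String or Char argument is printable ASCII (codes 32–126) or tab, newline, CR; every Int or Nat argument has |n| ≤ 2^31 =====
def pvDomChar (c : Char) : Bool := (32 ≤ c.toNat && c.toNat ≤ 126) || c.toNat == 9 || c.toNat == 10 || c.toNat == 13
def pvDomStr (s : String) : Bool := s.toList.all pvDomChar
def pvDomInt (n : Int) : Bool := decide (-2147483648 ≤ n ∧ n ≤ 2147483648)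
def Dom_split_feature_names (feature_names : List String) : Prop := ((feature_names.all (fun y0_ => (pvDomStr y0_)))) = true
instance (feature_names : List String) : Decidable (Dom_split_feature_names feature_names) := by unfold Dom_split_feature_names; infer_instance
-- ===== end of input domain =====

-- B gathers all underscore positions and takes one argmin under the key (|p-mid|, -p)
-- instead of A's two directional searches plus four-way branch chain; simpler, same cost.

-- ===== PORT A =====
-- name.rfind('_', 0, stop): scan with index, remember the last '_' seen (Python returns -1 if none)
def pvRFindA : List Char → Nat → Int → Int
  | [], _, acc => acc
  | c :: rest, i, acc => pvRFindA rest (i + 1) (if c = '_' then (i : Int) else acc)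

-- name.find('_', start): first '_' at index ≥ start, -1 if none
def pvFindA : List Char → Nat → Int
  | [], _ => -1
  | c :: rest, i => if c = '_' then (i : Int) else pvFindA rest (i + 1)

def pvSplitOneA (name : String) : String :=
  let cs := name.toList
  let midN := cs.length / 2
  let left := pvRFindA (cs.take midN) 0 (-1)
  let right := pvFindA (cs.drop midN) midN
  let sp : Int :=
    if left = -1 ∧ right = -1 then (cs.length : Int)
    else if left = -1 then right
    else if right = -1 then left
    else if (midN : Int) - left < right - (midN : Int) then left else right
  if sp = (cs.length : Int) then name
  else String.ofList (cs.take sp.toNat ++ '\n' :: cs.drop (sp.toNat + 1))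

def split_feature_names (feature_names : List String) : List String :=
  feature_names.foldl (fun acc n => acc ++ [pvSplitOneA n]) []

-- ===== PORT B =====
-- key(p) = (abs(p - mid), -p)
def pvKeyB (mid p : Int) : Int × Int := (|p - mid|, -p)

-- tuple comparison (k1 < k2) on pairs, as Python compares the keys
def pvKeyLtB (a b : Int × Int) : Bool :=
  decide (a.1 < b.1) || (decide (a.1 = b.1) && decide (a.2 < b.2))

-- one step of min(idxs, key=…): keep the strictly smaller key (first wins on equal keys)
def pvStep (mid : Int) (best : Option Int) (p : Int) : Option Int :=
  match best with
  | none => some p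
  | some q => if pvKeyLtB (pvKeyB mid p) (pvKeyB mid q) then some p else some q

def pvMinB (mid : Int) (idxs : List Int) : Option Int :=
  idxs.foldl (pvStep mid) none

def pvSplitOneB (name : String) : String :=
  let cs := name.toList
  let idxs := (PySem.List.enumerate cs 0).filterMap (fun ic => if ic.2 = '_' then some ic.1 else none)
  match pvMinB ((cs.length / 2 : Nat) : Int) idxs with
  | none => name
  | some sp => String.ofList (cs.take sp.toNat ++ '\n' :: cs.drop (sp.toNat + 1))

def split_feature_names_alt (feature_names : List String) : List String :=
  feature_names.map pvSplitOneB

-- ===== PRECONDITION & SPEC =====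
def Spec_split_feature_names (feature_names : List String) (out : List String) : Prop := out = split_feature_names_alt feature_names
instance (feature_names : List String) (out : List String) : Decidable (Spec_split_feature_names feature_names out) := by unfold Spec_split_feature_names; infer_instance

-- ===== CLAIM (what is proved, stated in full; the proofs are below) =====
def Claim_equal_split_feature_names : Prop := ∀ (feature_names : List String), Dom_split_feature_names feature_names → Spec_split_feature_names feature_names (split_feature_names feature_names)

-- ===== LEMMAS AND PROOFS =====

theorem pvStep_none (mid p : Int) : pvStep mid none p = some p := rfl

theorem pvStep_some (mid q p : Int) :
    pvStep mid (some q) p = if pvKeyLtB (pvKeyB mid p) (pvKeyB mid q) then some p else some q := rfl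

-- positions (as Int) of '_' in cs, counting from start s
def pvU (cs : List Char) (s : Int) : List Int :=
  match cs with
  | [] => []
  | c :: rest => if c = '_' then s :: pvU rest (s + 1) else pvU rest (s + 1)

theorem pvU_enum (cs : List Char) (s : Int) :
    (PySem.List.enumerate cs s).filterMap (fun ic => if ic.2 = '_' then some ic.1 else none)
      = pvU cs s := by
  induction cs generalizing s with
  | nil => simp [pvU, PySem.List.enumerate_nil]
  | cons c rest ih =>
    simp only [PySem.List.enumerate_cons, List.filterMap_cons, pvU]
    by_cases h : c = '_' <;> simp [h, ih]

theorem pvU_rfind : ∀ (cs : List Char) (i : Nat) (acc : Int),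
    pvRFindA cs i acc = (pvU cs (i : Int)).getLastD acc
  | [], _, _ => rfl
  | c :: rest, i, acc => by
    rw [pvRFindA, pvU]
    by_cases h : c = '_'
    · rw [if_pos h, if_pos h, pvU_rfind rest (i + 1) i, List.getLastD_cons]
      push_cast
      rfl
    · rw [if_neg h, if_neg h, pvU_rfind rest (i + 1) acc]
      push_cast
      rfl

theorem pvU_find : ∀ (cs : List Char) (i : Nat),
    pvFindA cs i = ((pvU cs (i : Int)).head?).getD (-1)
  | [], _ => rfl
  | c :: rest, i => by
    rw [pvFindA, pvU]
    by_cases h : c = '_'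
    · rw [if_pos h, if_pos h]; rfl
    · rw [if_neg h, if_neg h, pvU_find rest (i + 1)]
      push_cast
      rfl

theorem pvU_append (xs ys : List Char) (s : Int) :
    pvU (xs ++ ys) s = pvU xs s ++ pvU ys (s + xs.length) := by
  induction xs generalizing s with
  | nil => simp [pvU]
  | cons c rest ih =>
    simp only [List.cons_append, pvU, ih]
    by_cases h : c = '_' <;> simp [h] <;> ring_nf

theorem pvU_mem (cs : List Char) (s : Int) :
    ∀ p ∈ pvU cs s, s ≤ p ∧ p < s + cs.length := by
  induction cs generalizing s with
  | nil => simp [pvU]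
  | cons c rest ih =>
    intro p hp
    simp only [pvU] at hp
    by_cases h : c = '_'
    · simp [h] at hp
      rcases hp with rfl | hp
      · simp only [List.length_cons]; omega
      · have := ih (s + 1) p hp; simp at this ⊢; omega
    · simp [h] at hp
      have := ih (s + 1) p hp; simp at this ⊢; omega

theorem pvU_sorted (cs : List Char) (s : Int) :
    (pvU cs s).Pairwise (· < ·) := by
  induction cs generalizing s with
  | nil => simp [pvU]
  | cons c rest ih =>
    simp only [pvU]
    by_cases h : c = '_'
    · simp [h]
      refine ⟨fun p hp => ?_, ih (s + 1)⟩
      have := pvU_mem rest (s + 1) p hp; omega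
    · rw [if_neg h]; exact ih (s + 1)

-- once the accumulator's key is strictly below every remaining key, the fold keeps it
theorem pvFold_stay (mid : Int) (rs : List Int) (b : Int)
    (h : ∀ p ∈ rs, pvKeyLtB (pvKeyB mid p) (pvKeyB mid b) = false) :
    rs.foldl (pvStep mid) (some b) = some b := by
  induction rs with
  | nil => rfl
  | cons r rs' ih =>
    simp only [List.foldl_cons, pvStep_some]
    rw [h r (by simp), if_neg Bool.false_ne_true]
    exact ih (fun p hp => h p (by simp [hp]))

-- folding the ascending left-of-mid positions always keeps the newest, ending at the last
theorem pvFold_left (mid : Int) :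
    ∀ ls : List Int, ls.Pairwise (· < ·) → (∀ p ∈ ls, p < mid) →
      ∀ q : Int, q < mid → (∀ p ∈ ls, q < p) →
        ls.foldl (pvStep mid) (some q) = some (ls.getLastD q) := by
  intro ls
  induction ls with
  | nil => intro _ _ q _ _; rfl
  | cons l ls' ih =>
    intro hsort hlt q hq hqlt
    simp only [List.foldl_cons, pvStep_some, List.getLastD_cons]
    have hl : l < mid := hlt l (by simp)
    have hql : q < l := hqlt l (by simp)
    have hkey : pvKeyLtB (pvKeyB mid l) (pvKeyB mid q) = true := by
      simp only [pvKeyLtB, pvKeyB]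
      have h1 : |l - mid| = mid - l := by rw [abs_of_nonpos (by omega)]; ring
      have h2 : |q - mid| = mid - q := by rw [abs_of_nonpos (by omega)]; ring
      simp [h1, h2]; omega
    rw [if_pos hkey]
    simp only [List.pairwise_cons] at hsort
    exact ih hsort.2 (fun p hp => hlt p (by simp [hp])) l hl hsort.1

theorem pvSplitOne_eq (name : String) : pvSplitOneA name = pvSplitOneB name := by
  simp only [pvSplitOneA, pvSplitOneB, pvMinB]
  rw [pvU_enum]
  set cs := name.toList with hcs
  set midN := cs.length / 2 with hmid
  have hmle : midN ≤ cs.length := Nat.div_le_self _ _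
  have hlen : (cs.take midN).length = midN := by simp [List.length_take, hmle]
  have hU : pvU cs 0 = pvU (cs.take midN) 0 ++ pvU (cs.drop midN) midN := by
    conv_lhs => rw [(List.take_append_drop midN cs).symm]
    rw [pvU_append]; simp [hlen]
  rw [pvU_rfind, pvU_find, hU, List.foldl_append]
  rcases hL : pvU (cs.take midN) 0 with _ | ⟨l0, ls'⟩ <;>
    rcases hR : pvU (cs.drop midN) (midN : Int) with _ | ⟨r0, rs'⟩
  · simp
  · -- no left candidate: B's fold starts the right run at r0 and keeps it
    have hRmem : ∀ p ∈ r0 :: rs', (midN : Int) ≤ p ∧ p < (cs.length : Int) := by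
      rw [← hR]
      intro p hp
      have := pvU_mem (cs.drop midN) (midN : Int) p hp
      rw [List.length_drop] at this
      have hcast : ((cs.length - midN : Nat) : Int) = (cs.length : Int) - midN := by
        push_cast [hmle]; ring
      omega
    have hRsort : (r0 :: rs').Pairwise (· < ·) := hR ▸ pvU_sorted _ _
    obtain ⟨hr0m, hr0l⟩ := hRmem r0 (by simp)
    simp only [List.foldl_nil, List.foldl_cons, pvStep_none, List.getLastD_nil,
      List.head?_cons, Option.getD_some]
    rw [pvFold_stay]
    · have hne : ¬((r0 : Int) = (cs.length : Int)) := by omega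
      have hne1 : ¬((r0 : Int) = -1) := by omega
      simp [hne, hne1]
    · intro p hp
      simp only [List.pairwise_cons] at hRsort
      have hpr : r0 < p := hRsort.1 p hp
      simp only [pvKeyLtB, pvKeyB]
      obtain ⟨hpm, _⟩ := hRmem p (by simp [hp])
      have h1 : |p - (midN : Int)| = p - midN := abs_of_nonneg (by omega)
      have h2 : |r0 - (midN : Int)| = r0 - midN := abs_of_nonneg (by omega)
      simp [h1, h2]; omega
  · -- no right candidate: the left fold ends at the last left position
    have hLmem : ∀ p ∈ l0 :: ls', 0 ≤ p ∧ p < (midN : Int) := by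
      rw [← hL]
      intro p hp
      have := pvU_mem (cs.take midN) 0 p hp
      rw [hlen] at this; omega
    have hLsort : (l0 :: ls').Pairwise (· < ·) := hL ▸ pvU_sorted _ _
    obtain ⟨hL0, hLlt⟩ := hLmem (ls'.getLastD l0) List.getLastD_mem_cons
    simp only [List.pairwise_cons] at hLsort
    simp only [List.foldl_cons, List.foldl_nil, pvStep_none, List.getLastD_cons,
      List.head?_nil, Option.getD_none]
    rw [pvFold_left (midN : Int) ls' hLsort.2 (fun p hp => (hLmem p (by simp [hp])).2)
      l0 (hLmem l0 (by simp)).2 hLsort.1]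
    simp only [List.getLastD_eq_getLast?] at hL0 hLlt ⊢
    have hne1 : ¬(ls'.getLast?.getD l0 = -1) := by omega
    have hnel : ¬(ls'.getLast?.getD l0 = (cs.length : Int)) := by omega
    simp [hne1, hnel]
  · -- candidates on both sides: the first right position challenges the last left one
    have hLmem : ∀ p ∈ l0 :: ls', 0 ≤ p ∧ p < (midN : Int) := by
      rw [← hL]
      intro p hp
      have := pvU_mem (cs.take midN) 0 p hp
      rw [hlen] at this; omega
    have hRmem : ∀ p ∈ r0 :: rs', (midN : Int) ≤ p ∧ p < (cs.length : Int) := by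
      rw [← hR]
      intro p hp
      have := pvU_mem (cs.drop midN) (midN : Int) p hp
      rw [List.length_drop] at this
      have hcast : ((cs.length - midN : Nat) : Int) = (cs.length : Int) - midN := by
        push_cast [hmle]; ring
      omega
    have hLsort : (l0 :: ls').Pairwise (· < ·) := hL ▸ pvU_sorted _ _
    have hRsort : (r0 :: rs').Pairwise (· < ·) := hR ▸ pvU_sorted _ _
    obtain ⟨hL0, hLlt⟩ := hLmem (ls'.getLastD l0) List.getLastD_mem_cons
    obtain ⟨hr0m, hr0l⟩ := hRmem r0 (by simp)
    simp only [List.pairwise_cons] at hLsort hRsort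
    simp only [List.foldl_cons, pvStep_none, List.getLastD_cons, List.head?_cons,
      Option.getD_some]
    rw [pvFold_left (midN : Int) ls' hLsort.2 (fun p hp => (hLmem p (by simp [hp])).2)
      l0 (hLmem l0 (by simp)).2 hLsort.1]
    set L := ls'.getLastD l0 with hLdef
    rw [pvStep_some]
    have hkey : pvKeyLtB (pvKeyB (midN : Int) r0) (pvKeyB (midN : Int) L)
        = decide (r0 - (midN : Int) ≤ (midN : Int) - L) := by
      simp only [pvKeyLtB, pvKeyB]
      have h1 : |r0 - (midN : Int)| = r0 - midN := abs_of_nonneg (by omega)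
      have h2 : |L - (midN : Int)| = (midN : Int) - L := by
        rw [abs_of_nonpos (by omega)]; ring
      simp only [h1, h2]
      by_cases hc : r0 - (midN : Int) ≤ (midN : Int) - L
      · rcases lt_or_eq_of_le hc with hlt | heq
        · simp [hlt, hc]
        · simp [heq]; omega
      · simp [hc]; omega
    rw [hkey]
    have hstay : ∀ b : Int, |b - (midN : Int)| ≤ r0 - midN →
        rs'.foldl (pvStep (midN : Int)) (some b) = some b := by
      intro b hbd
      apply pvFold_stay
      intro p hp
      have hpr : r0 < p := hRsort.1 p hp
      obtain ⟨hpm, _⟩ := hRmem p (by simp [hp])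
      simp only [pvKeyLtB, pvKeyB]
      have h1 : |p - (midN : Int)| = p - midN := abs_of_nonneg (by omega)
      simp only [h1]
      have hx1 : ¬(p - (midN : Int) < |b - (midN : Int)|) := by omega
      have hx2 : ¬(p - (midN : Int) = |b - (midN : Int)|) := by omega
      simp [hx1, hx2]
    have hne1 : ¬(L = -1) := by omega
    have hner : ¬((r0 : Int) = -1) := by omega
    by_cases hc : (midN : Int) - L < r0 - (midN : Int)
    · have hd : decide (r0 - (midN : Int) ≤ (midN : Int) - L) = false := by
        simp; omega
      rw [hd, if_neg Bool.false_ne_true,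
        hstay L (by rw [abs_of_nonpos (by omega)]; omega)]
      have hnel : ¬(L = (cs.length : Int)) := by omega
      simp [hne1, hner, hc, hnel]
    · have hd : decide (r0 - (midN : Int) ≤ (midN : Int) - L) = true := by
        simp; omega
      rw [hd, if_pos rfl, hstay r0 (le_of_eq (abs_of_nonneg (by omega)))]
      have hnel : ¬((r0 : Int) = (cs.length : Int)) := by omega
      simp [hne1, hner, hc, hnel]

theorem split_feature_names_eq (fns : List String) :
    split_feature_names fns = split_feature_names_alt fns := by
  unfold split_feature_names split_feature_names_alt
  rw [PySem.List.foldl_append_singleton_eq_map]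
  exact List.map_congr_left (fun n _ => pvSplitOne_eq n)

-- ===== VERDICT (by name: the statement is the Claim_ definition above) =====
theorem split_feature_names_spec : Claim_equal_split_feature_names := by
  intro fns _
  unfold Spec_split_feature_names
  exact split_feature_names_eq fns
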